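-- pv_equiv track=rewrite | github.com/jujumilk3/algorithm-study | Programmers/kakao/2020/데모 테스트/1.프로그래밍1.py | solution
-- ===== SOURCE A (Python) =====
-- def solution(v):
--     answer = []
--     first_stack = []
--     second_stack = []
--     for i in range(len(v)):
--         if v[i][0] not in first_stack:
--             first_stack.append(v[i][0])
--         else:
--             first_stack.remove(v[i][0])
--         if v[i][1] not in second_stack:
--             second_stack.append(v[i][1])
--         else:
--             second_stack.remove(v[i][1])
--     answer.append(*first_stack)
--     answer.append(*second_stack)
--     return answer
-- ===== SOURCE B (Python) =====
-- def solution(v):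
--     count_x = {}
--     count_y = {}
--     for p in v:
--         count_x[p[0]] = count_x.get(p[0], 0) + 1
--         count_y[p[1]] = count_y.get(p[1], 0) + 1
--     first_list = [k for k, c in count_x.items() if c % 2 == 1]
--     second_list = [k for k, c in count_y.items() if c % 2 == 1]
--     answer = []
--     answer.append(*first_list)
--     answer.append(*second_list)
--     return answer
-- ===== Notes on version B (the rewrite author's own statement) =====
-- stated objective: alternative
-- what changed: Replaces A's toggle-membership lists (a linear membership test and remove per element) by two count dictionaries built in one pass, then picks the unique odd-count x and y coordinate.
import Mathlib
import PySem

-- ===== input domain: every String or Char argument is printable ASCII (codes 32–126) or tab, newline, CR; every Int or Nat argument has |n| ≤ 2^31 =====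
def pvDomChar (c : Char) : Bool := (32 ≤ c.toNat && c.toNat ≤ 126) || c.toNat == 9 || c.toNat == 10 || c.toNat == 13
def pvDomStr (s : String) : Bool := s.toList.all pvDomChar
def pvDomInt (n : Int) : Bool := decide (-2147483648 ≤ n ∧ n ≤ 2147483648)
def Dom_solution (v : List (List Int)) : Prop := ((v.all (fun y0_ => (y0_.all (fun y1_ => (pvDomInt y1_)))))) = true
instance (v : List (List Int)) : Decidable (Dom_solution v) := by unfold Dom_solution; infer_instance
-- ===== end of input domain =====

-- B replaces A's toggle-membership lists by two count dictionaries built in one pass,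
-- then selects the unique odd-count x and y coordinate (alternative decomposition).


-- ===== PORT A =====
-- one iteration of A's 'if x not in stack: append else remove' toggle
def pvToggle (s : List Int) (x : Int) : List Int :=
  if x ∈ s then (PySem.List.remove? s x).getD s else s ++ [x]

def solution (v : List (List Int)) : List Int :=
  let st := v.foldl
    (fun (p : List Int × List Int) row =>
      (pvToggle p.1 (PySem.List.pyGetD row 0 0), pvToggle p.2 (PySem.List.pyGetD row 1 0)))
    ([], [])
  -- answer.append(*first_stack); answer.append(*second_stack): under Pre_ both stacks are singletons
  [st.1.headD 0, st.2.headD 0]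

-- ===== PORT B =====
def solution_alt (v : List (List Int)) : List Int :=
  let cnts := v.foldl
    (fun (d : PySem.Dict Int Int × PySem.Dict Int Int) p =>
      (d.1.insert (PySem.List.pyGetD p 0 0) (d.1.getD (PySem.List.pyGetD p 0 0) 0 + 1),
       d.2.insert (PySem.List.pyGetD p 1 0) (d.2.getD (PySem.List.pyGetD p 1 0) 0 + 1)))
    (PySem.Dict.empty, PySem.Dict.empty)
  let firstList := (cnts.1.items.filter (fun kv => PySem.Int.mod kv.2 2 == 1)).map (fun kv => kv.1)
  let secondList := (cnts.2.items.filter (fun kv => PySem.Int.mod kv.2 2 == 1)).map (fun kv => kv.1)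
  -- answer.append(*first_list); answer.append(*second_list): under Pre_ both lists are singletons
  [firstList.headD 0, secondList.headD 0]

-- ===== PRECONDITION & SPEC =====
-- the distinct values of xs that occur an odd number of times, in first-occurrence order
def pvOdds (xs : List Int) : List Int :=
  (PySem.Set.ofList xs).filter (fun a => xs.count a % 2 == 1)

-- A raises (IndexError) when some row has fewer than 2 entries, and (TypeError on
-- answer.append(*stack)) unless exactly one x value and one y value occur an odd
-- number of times; Pre_ is exactly A's normal-return domain.
def Pre_solution (v : List (List Int)) : Prop :=
  (∀ r ∈ v, 2 ≤ r.length) ∧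
  (pvOdds (v.map (fun r => PySem.List.pyGetD r 0 0))).length = 1 ∧
  (pvOdds (v.map (fun r => PySem.List.pyGetD r 1 0))).length = 1
instance (v : List (List Int)) : Decidable (Pre_solution v) := by unfold Pre_solution; infer_instance

def pvWitness_solution : List (List Int) := [[1, 1], [1, 4], [5, 4]]

def Spec_solution (v : List (List Int)) (out : List Int) : Prop := out = solution_alt v
instance (v : List (List Int)) (out : List Int) : Decidable (Spec_solution v out) := by unfold Spec_solution; infer_instance

-- ===== CLAIM (what is proved, stated in full; the proofs are below) =====
def Claim_equal_solution : Prop := ∀ (v : List (List Int)), Dom_solution v → Pre_solution v → Spec_solution v (solution v)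

-- ===== LEMMAS AND PROOFS =====

theorem pvToggle_nodup (s : List Int) (x : Int) (h : s.Nodup) : (pvToggle s x).Nodup := by
  unfold pvToggle
  by_cases hm : x ∈ s
  · rw [if_pos hm, PySem.List.remove?_eq_some_erase s x hm]
    exact h.erase x
  · rw [if_neg hm]
    simp [List.nodup_append, h]
    intro a ha he
    exact hm (he ▸ ha)

theorem mem_pvToggle (s : List Int) (x k : Int) (h : s.Nodup) :
    k ∈ pvToggle s x ↔ (if k = x then k ∉ s else k ∈ s) := by
  unfold pvToggle
  by_cases hm : x ∈ s
  · rw [if_pos hm, PySem.List.remove?_eq_some_erase s x hm, Option.getD_some, h.mem_erase_iff]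
    by_cases hk : k = x
    · subst hk; simp [hm]
    · simp [hk]
  · rw [if_neg hm]
    by_cases hk : k = x
    · subst hk; simp [hm]
    · simp [hk]

theorem mem_foldl_pvToggle (xs : List Int) (s : List Int) (h : s.Nodup) :
    (xs.foldl pvToggle s).Nodup ∧
    ∀ k, k ∈ xs.foldl pvToggle s ↔ (if xs.count k % 2 = 1 then k ∉ s else k ∈ s) := by
  induction xs generalizing s with
  | nil => simpa using h
  | cons x xs ih =>
    obtain ⟨hnd, hmem⟩ := ih (pvToggle s x) (pvToggle_nodup s x h)
    refine ⟨hnd, fun k => ?_⟩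
    rw [List.foldl_cons, hmem k, mem_pvToggle s x k h]
    simp only [List.count_cons]
    by_cases hk : k = x
    · subst hk
      rcases Nat.mod_two_eq_zero_or_one (xs.count k) with h2 | h2 <;>
        · have h3 := Nat.add_mod (xs.count k) 1 2
          simp [h2] at h3
          simp [h2, h3]
    · simp [hk, Ne.symm hk]

theorem mem_pvOdds (xs : List Int) (k : Int) : k ∈ pvOdds xs ↔ xs.count k % 2 = 1 := by
  unfold pvOdds
  rw [List.mem_filter, PySem.Set.mem_ofList]
  constructor
  · rintro ⟨-, h⟩; simpa using h
  · intro h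
    refine ⟨?_, by simpa using h⟩
    by_contra hnx
    rw [List.count_eq_zero_of_not_mem hnx] at h
    simp at h

theorem nodup_singleton_of_mem_iff (l : List Int) (z : Int) (hnd : l.Nodup)
    (h : ∀ k, k ∈ l ↔ k = z) : l = [z] := by
  cases l with
  | nil => exact absurd ((h z).mpr rfl) (by simp)
  | cons a t =>
    have ha : a = z := (h a).mp (by simp)
    have ht : t = [] := by
      rw [List.eq_nil_iff_forall_not_mem]
      intro b hb
      have hb' : b = z := (h b).mp (by simp [hb])
      have : a ∉ t := (List.nodup_cons.mp hnd).1
      rw [ha] at this; rw [hb'] at hb; exact this hb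
    rw [ha, ht]

-- A's final stack for one coordinate list, when exactly one value has odd count
theorem foldl_pvToggle_eq (xs : List Int) (z : Int) (h : pvOdds xs = [z]) :
    xs.foldl pvToggle [] = [z] := by
  obtain ⟨hnd, hmem⟩ := mem_foldl_pvToggle xs [] (by simp)
  refine nodup_singleton_of_mem_iff _ z hnd (fun k => ?_)
  rw [hmem k]
  have : k ∈ pvOdds xs ↔ k = z := by rw [h]; simp
  rw [← this, mem_pvOdds]
  rcases Nat.mod_two_eq_zero_or_one (xs.count k) with h2 | h2 <;> simp [h2]

theorem mod_two_bool (n : Nat) : (PySem.Int.mod (n : Int) 2 == 1) = (n % 2 == 1) := by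
  rw [PySem.Int.mod_eq_emod_of_pos (by norm_num)]
  rcases Nat.mod_two_eq_zero_or_one n with h2 | h2 <;> · simp; omega

-- B's selected key for one coordinate list, when exactly one value has odd count
theorem counter_pick_eq (xs : List Int) (z : Int) (h : pvOdds xs = [z]) :
    (((PySem.Dict.counter xs).items.filter (fun kv => PySem.Int.mod kv.2 2 == 1)).map (fun kv => kv.1)).headD 0 = z := by
  rw [PySem.Dict.items_counter, List.filter_map]
  have hf : ((PySem.Set.ofList xs).filter
      ((fun kv : Int × Int => PySem.Int.mod kv.2 2 == 1) ∘ fun k => (k, (xs.count k : Int))))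
      = pvOdds xs := by
    unfold pvOdds
    apply List.filter_congr
    intro a _
    simp only [Function.comp]
    exact mod_two_bool (xs.count a)
  rw [hf, h]
  simp

theorem pvOdds_length_one (xs : List Int) (h : (pvOdds xs).length = 1) :
    ∃ z, pvOdds xs = [z] := by
  cases hx : pvOdds xs with
  | nil => rw [hx] at h; simp at h
  | cons a t =>
    rw [hx] at h
    simp at h
    exact ⟨a, by rw [h]⟩

theorem pvFoldlA (v : List (List Int)) (j : Int) :
    List.foldl (fun acc row => pvToggle acc (PySem.List.pyGetD row j 0)) [] v
      = List.foldl pvToggle [] (v.map (fun r => PySem.List.pyGetD r j 0)) := by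
  rw [List.foldl_map]

theorem pvFoldlB (v : List (List Int)) (j : Int) :
    List.foldl (fun (d : PySem.Dict Int Int) p =>
        d.insert (PySem.List.pyGetD p j 0) (d.getD (PySem.List.pyGetD p j 0) 0 + 1))
        PySem.Dict.empty v
      = PySem.Dict.counter (v.map (fun r => PySem.List.pyGetD r j 0)) := by
  rw [← PySem.Dict.foldl_insert_getD_add_one_eq_counter, List.foldl_map]

-- ===== VERDICT (by name: the statement is the Claim_ definition above) =====
theorem solution_spec : Claim_equal_solution := by
  intro v _ hpre
  obtain ⟨-, hx, hy⟩ := hpre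
  obtain ⟨zx, hzx⟩ := pvOdds_length_one _ hx
  obtain ⟨zy, hzy⟩ := pvOdds_length_one _ hy
  unfold Spec_solution solution solution_alt
  rw [PySem.List.foldl_prod_mk
        (f := fun acc row => pvToggle acc (PySem.List.pyGetD row 0 0))
        (g := fun acc row => pvToggle acc (PySem.List.pyGetD row 1 0)),
      PySem.List.foldl_prod_mk
        (f := fun d p => PySem.Dict.insert d (PySem.List.pyGetD p 0 0)
                (PySem.Dict.getD d (PySem.List.pyGetD p 0 0) 0 + 1))
        (g := fun d p => PySem.Dict.insert d (PySem.List.pyGetD p 1 0)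
                (PySem.Dict.getD d (PySem.List.pyGetD p 1 0) 0 + 1))]
  simp only [pvFoldlA, pvFoldlB, foldl_pvToggle_eq _ _ hzx, foldl_pvToggle_eq _ _ hzy,
      counter_pick_eq _ _ hzx, counter_pick_eq _ _ hzy, List.headD_cons]
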